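-- pv_equiv track=rewrite | github.com/sssssea7/LeetcodePractice | BinarySearch/2300. Successful Pairs of Spells and Potions.py | successfulPairs
-- ===== SOURCE A (Python) =====
-- from typing import List
--
-- def successfulPairs(S: List[int], P: List[int], success: int) -> List[int]:
--     P.sort()
--     def find_min(s, P, success):
--         l, r = 0, len(P)
--         while l<r:
--             m = (l+r)//2
--             if s*P[m]>=success:
--                 r = m
--             else:
--                 l = m + 1
--         return l
--
--     ans = []
--     for i in range(len(S)):
--         p_l = find_min(S[i], P, success)
--         ans.append(len(P)-p_l)
--     return ans
-- ===== SOURCE B (Python) =====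
-- def successfulPairs(S, P, success):
--     # simpler: sort P in place (same observable mutation as A), then count
--     # the qualifying potions for each spell directly -- no binary search.
--     P.sort()
--     return [sum(1 for p in P if s * p >= success) for s in S]
-- ===== Notes on version B (the rewrite author's own statement) =====
-- stated objective: simpler
-- what changed: A sorts P and runs a hand-written binary search (bisect_left on s*P[m] >= success) per spell, while B drops the search and counts the qualifying potions for each spell with a direct scan; Pre_ excludes inputs containing a negative spell whose success predicate is neither all-true nor all-false over P (outside the problem's positive-value domain), where A's bisection runs on a non-monotonic predicate and its returned index is an accident of the bisection path.
-- outside the precondition, e.g. on successfulPairs([-1], [-3, 1, 2], 2): A returns [0], B returns [1]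
import Mathlib
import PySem

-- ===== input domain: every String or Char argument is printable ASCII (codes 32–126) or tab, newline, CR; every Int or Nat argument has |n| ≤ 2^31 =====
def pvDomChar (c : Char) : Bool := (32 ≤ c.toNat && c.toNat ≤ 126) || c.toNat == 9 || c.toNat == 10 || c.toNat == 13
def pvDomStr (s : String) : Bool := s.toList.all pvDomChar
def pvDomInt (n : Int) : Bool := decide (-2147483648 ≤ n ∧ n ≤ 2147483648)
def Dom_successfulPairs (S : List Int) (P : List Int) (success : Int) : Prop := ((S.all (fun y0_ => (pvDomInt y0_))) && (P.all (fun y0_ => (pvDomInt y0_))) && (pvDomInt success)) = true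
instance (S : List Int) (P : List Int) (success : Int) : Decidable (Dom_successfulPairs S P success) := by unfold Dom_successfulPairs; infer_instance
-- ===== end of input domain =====

-- B replaces A's per-spell binary search over sorted P by a direct per-spell count (simpler, no
-- index arithmetic); both Pythons sort P in place, and the equivalence proved is about the return value.


-- ===== PORT A =====
-- find_min's while loop: l, r as Python ints; P1[m] is always in range on A's calls (pyGetD default 0)
def pvFindMin (s : Int) (P1 : List Int) (success : Int) (l r : Int) : Int :=
  if h : l < r then
    let m := PySem.Int.floordiv (l + r) 2
    if s * PySem.List.pyGetD P1 m 0 ≥ success then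
      pvFindMin s P1 success l m
    else
      pvFindMin s P1 success (m + 1) r
  else l
termination_by (r - l).toNat
decreasing_by
  · have hm : PySem.Int.floordiv (l + r) 2 = (l + r) / 2 :=
      PySem.Int.floordiv_eq_ediv_of_pos (by omega)
    simp only [hm]; omega
  · have hm : PySem.Int.floordiv (l + r) 2 = (l + r) / 2 :=
      PySem.Int.floordiv_eq_ediv_of_pos (by omega)
    simp only [hm]; omega

def successfulPairs (S : List Int) (P : List Int) (success : Int) : List Int :=
  -- P.sort(); below, 'PySem.List.sorted P id' is the sorted P every later line reads
  (PySem.List.pyRange 0 (S.length : Int) 1).foldl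
    (fun ans i =>
      ans ++ [((PySem.List.sorted P (fun x => x) false).length : Int) -
        pvFindMin (PySem.List.pyGetD S i 0) (PySem.List.sorted P (fun x => x) false) success 0
          ((PySem.List.sorted P (fun x => x) false).length : Int)])
    []

-- ===== PORT B =====
def successfulPairs_alt (S : List Int) (P : List Int) (success : Int) : List Int :=
  -- P.sort(), then the per-spell count over the sorted list
  S.map (fun s =>
    (((PySem.List.sorted P (fun x => x) false).countP (fun p => decide (s * p ≥ success))) : Int))

-- ===== PRECONDITION & SPEC =====
-- Pre_ excludes inputs containing a negative spell whose success predicate is neither all-true nor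
-- all-false over P (outside the problem's positive-value domain): there A's bisection runs on a
-- non-monotonic predicate and its returned index is an accident of the bisection path; B returns
-- the true count.
def Pre_successfulPairs (S : List Int) (P : List Int) (success : Int) : Prop :=
  ∀ s ∈ S, s < 0 → (∀ p ∈ P, s * p ≥ success) ∨ (∀ p ∈ P, s * p < success)
instance (S : List Int) (P : List Int) (success : Int) : Decidable (Pre_successfulPairs S P success) := by
  unfold Pre_successfulPairs; infer_instance

def pvWitness_successfulPairs : List Int × List Int × Int := ([2, -3], [1, 3], 4)

def Spec_successfulPairs (S : List Int) (P : List Int) (success : Int) (out : List Int) : Prop := out = successfulPairs_alt S P success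
instance (S : List Int) (P : List Int) (success : Int) (out : List Int) : Decidable (Spec_successfulPairs S P success out) := by unfold Spec_successfulPairs; infer_instance

-- ===== CLAIM (what is proved, stated in full; the proofs are below) =====
def Claim_equal_successfulPairs : Prop := ∀ (S : List Int) (P : List Int) (success : Int), Dom_successfulPairs S P success → Pre_successfulPairs S P success → Spec_successfulPairs S P success (successfulPairs S P success)

-- ===== LEMMAS AND PROOFS =====

-- A's bisection loop, characterized: given a split point F such that the predicate is false on
-- [0, F) and true on [F, len), the loop called on [l, r] ∋ F returns F.
theorem pvFindMin_eq (s success : Int) (P1 : List Int) (F : Int)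
    (l r : Int) (hl0 : 0 ≤ l) (hl : l ≤ F) (hr : F ≤ r) (hrn : r ≤ (P1.length : Int))
    (htrue : ∀ m : Int, F ≤ m → m < (P1.length : Int) → s * PySem.List.pyGetD P1 m 0 ≥ success)
    (hfalse : ∀ m : Int, 0 ≤ m → m < F → ¬ (s * PySem.List.pyGetD P1 m 0 ≥ success)) :
    pvFindMin s P1 success l r = F := by
  generalize hk : (r - l).toNat = k
  induction k using Nat.strong_induction_on generalizing l r with
  | _ k ih =>
    rw [pvFindMin]
    split
    · next hlr =>
      have hm : PySem.Int.floordiv (l + r) 2 = (l + r) / 2 :=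
        PySem.Int.floordiv_eq_ediv_of_pos (by omega)
      simp only [hm]
      have hmlo : l ≤ (l + r) / 2 := by omega
      have hmhi : (l + r) / 2 < r := by omega
      split
      · next hq =>
        -- predicate true at the midpoint ⇒ F ≤ midpoint
        have hFm : F ≤ (l + r) / 2 := by
          by_contra hcon
          exact hfalse ((l + r) / 2) (by omega) (by omega) hq
        exact ih ((l + r) / 2 - l).toNat (by omega) l ((l + r) / 2) hl0 hl hFm (by omega) rfl
      · next hq =>
        -- predicate false at the midpoint ⇒ midpoint < F
        have hmF : (l + r) / 2 < F := by
          by_contra hcon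
          exact hq (htrue ((l + r) / 2) (by omega) (by omega))
        exact ih (r - ((l + r) / 2 + 1)).toNat (by omega) ((l + r) / 2 + 1) r (by omega)
          (by omega) hr hrn rfl
    · next hlr => omega

-- On a sorted list whose elements satisfy a membership-monotone success predicate, A's bisection
-- from [0, len] returns len − count: the qualifying elements are exactly the final suffix.
theorem findMin_eq_length_sub_count (s success : Int) (P1 : List Int)
    (hsort : P1.Pairwise (· ≤ ·))
    (hmono : ∀ x ∈ P1, ∀ y ∈ P1, x ≤ y → s * x ≥ success → s * y ≥ success) :
    (P1.length : Int) - pvFindMin s P1 success 0 (P1.length : Int)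
      = ((P1.countP (fun p => decide (s * p ≥ success))) : Int) := by
  set q : Int → Bool := fun p => decide (s * p ≥ success) with hq
  set u := P1.takeWhile (fun p => !(q p)) with hu
  set v := P1.dropWhile (fun p => !(q p)) with hv
  have hsplit : u ++ v = P1 := List.takeWhile_append_dropWhile
  -- every element of v satisfies q
  have hvq : ∀ y ∈ v, q y = true := by
    match hveq : v with
    | [] => intro y hy; simp at hy
    | h :: t =>
      have hh : q h = true := by
        have h2 := List.head?_dropWhile_not (p := fun p => !(q p)) (l := P1)
        rw [← hv] at h2
        simp at h2
        exact h2
      intro y hy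
      rcases List.mem_cons.mp hy with rfl | hyt
      · exact hh
      · -- h ≤ y from sortedness on v, then monotonicity
        have hvpair : (h :: t).Pairwise (· ≤ ·) := by
          have hs2 := hsort
          rw [← hsplit] at hs2
          exact (List.pairwise_append.mp hs2).2.1
        have hle : h ≤ y := (List.pairwise_cons.mp hvpair).1 y hyt
        have hmemh : h ∈ P1 := by
          rw [← hsplit]; exact List.mem_append_right _ (List.mem_cons_self ..)
        have hmemy : y ∈ P1 := by
          rw [← hsplit]
          exact List.mem_append_right _ (List.mem_cons_of_mem _ hyt)
        have := hmono h hmemh y hmemy hle (by simpa [hq] using hh)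
        simpa [hq] using this
  -- no element of u satisfies q
  have huq : ∀ y ∈ u, q y = false := by
    intro y hy
    have := List.mem_takeWhile_imp (l := P1) (p := fun p => !(q p)) hy
    simpa using this
  -- the count is v.length
  have hcount : P1.countP q = v.length := by
    rw [← hsplit, List.countP_append]
    have h1 : u.countP q = 0 := List.countP_eq_zero.mpr (by intro a ha; simp [huq a ha])
    have h2 : v.countP q = v.length := List.countP_eq_length.mpr (by intro a ha; simp [hvq a ha])
    omega
  have hlen : P1.length = u.length + v.length := by rw [← hsplit, List.length_append]
  -- apply the bisection characterization with F = u.length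
  have hmain : pvFindMin s P1 success 0 (P1.length : Int) = (u.length : Int) := by
    have hFle : (u.length : Int) ≤ (P1.length : Int) := by
      have : u.length ≤ P1.length := by omega
      exact_mod_cast this
    apply pvFindMin_eq s success P1 (u.length : Int) 0 (P1.length : Int)
      le_rfl (Int.natCast_nonneg _) hFle le_rfl
    · intro m hFm hmlen
      have hmnn : 0 ≤ m := by omega
      have hml : m.toNat < P1.length := by omega
      rw [PySem.List.pyGetD_eq_getElem P1 (0:Int) hmnn hmlen]
      have hmem : P1[m.toNat] ∈ v := by
        have hge : u.length ≤ m.toNat := by omega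
        have e1 : P1[m.toNat]'hml = (u ++ v)[m.toNat]'(by rw [hsplit]; exact hml) :=
          List.getElem_of_eq hsplit.symm hml
        have e2 : (u ++ v)[m.toNat]'(by rw [hsplit]; exact hml)
            = v[m.toNat - u.length]'(by omega) :=
          List.getElem_append_right hge
        rw [e1, e2]
        exact List.getElem_mem _
      have := hvq _ hmem
      simpa [hq] using this
    · intro m hmnn hmF
      have hml : m.toNat < u.length := by omega
      rw [PySem.List.pyGetD_eq_getElem P1 (0:Int) hmnn (by omega)]
      have hmem : P1[m.toNat]'(by omega) ∈ u := by
        have e1 : P1[m.toNat]'(by omega) = (u ++ v)[m.toNat]'(by rw [hsplit]; omega) :=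
          List.getElem_of_eq hsplit.symm (by omega)
        have e2 : (u ++ v)[m.toNat]'(by rw [hsplit]; omega) = u[m.toNat]'hml :=
          List.getElem_append_left hml
        rw [e1, e2]
        exact List.getElem_mem _
      have := huq _ hmem
      simp [hq] at this
      simpa [hq] using this
  rw [hmain, hcount]; omega

-- the monotonicity hypothesis holds for every spell admitted by Pre_
theorem spell_monotone (s success : Int) (P : List Int)
    (hpre : s < 0 → (∀ p ∈ P, s * p ≥ success) ∨ (∀ p ∈ P, s * p < success)) :
    ∀ x ∈ PySem.List.sorted P (fun x => x) false, ∀ y ∈ PySem.List.sorted P (fun x => x) false,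
      x ≤ y → s * x ≥ success → s * y ≥ success := by
  intro x hx y hy hxy hsx
  rw [PySem.List.mem_sorted] at hx hy
  rcases lt_or_ge s 0 with hneg | hpos
  · rcases hpre hneg with hall | hnone
    · exact hall y hy
    · exact absurd hsx (not_le.mpr (hnone x hx))
  · calc success ≤ s * x := hsx
      _ ≤ s * y := mul_le_mul_of_nonneg_left hxy hpos

-- ===== VERDICT (by name: the statement is the Claim_ definition above) =====
theorem successfulPairs_spec : Claim_equal_successfulPairs := by
  intro S P success _hdom hpre
  unfold Spec_successfulPairs successfulPairs successfulPairs_alt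
  rw [PySem.List.foldl_pyRange_zero_pyGetD' S 0
    (fun ans x => ans ++ [((PySem.List.sorted P (fun x => x) false).length : Int) -
      pvFindMin x (PySem.List.sorted P (fun x => x) false) success 0
        ((PySem.List.sorted P (fun x => x) false).length : Int)]) []]
  rw [PySem.List.foldl_append_singleton_eq_map]
  apply List.map_congr_left
  intro s hs
  exact findMin_eq_length_sub_count s success _
    (by simpa using PySem.List.sorted_pairwise P (fun x => x))
    (spell_monotone s success P (fun h => hpre s hs h))
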